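-- pv_equiv track=rewrite | github.com/MrL314/smk-spc700-disassembly | UTIL.py | APPLY_SPACING
-- ===== SOURCE A (Python) =====
-- def APPLY_SPACING(raw_text, SP_CTRL):
--
-- 	if SP_CTRL != "" and SP_CTRL[-1] == '\n': SP_CTRL = SP_CTRL[:-1]
--
-- 	SP_CONTROLS = []
-- 	L = len(SP_CTRL)
-- 	sp_idx = 0
--
-- 	spchrs = {'n', 's', 't'}
--
-- 	while sp_idx < L:
-- 		tag = SP_CTRL[sp_idx]
--
-- 		sp_idx += 1
--
-- 		t_size = ""
-- 		end = 0
-- 		while sp_idx + end < L: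
-- 			if SP_CTRL[sp_idx + end] in spchrs: break
-- 			t_size += SP_CTRL[sp_idx + end]
-- 			end += 1
--
-- 		if t_size == "": t_size = "1"
-- 		SP_CONTROLS.append(tag + t_size)
--
-- 		sp_idx += end
--
--
--
--
--
-- 	#SP_CONTROLS = SP_CTRL.split("\x02")
--
-- 	LINES = [l.replace('\n', "") for l in raw_text.replace('\r', '').split("\n")]
--
-- 	LINE_NUM = 0
--
-- 	for CTRL in SP_CONTROLS:
--
-- 		if CTRL[0] == "t":
-- 			LINES[LINE_NUM] += "\t"*int(CTRL[1:])
-- 		elif CTRL[0] == "s":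
-- 			LINES[LINE_NUM] += " "*int(CTRL[1:])
-- 		elif CTRL[0] == "n":
-- 			LINE_NUM += int(CTRL[1:])
--
-- 	return LINES
-- ===== SOURCE B (Python) =====
-- # One-pass rewrite: parse-and-apply fused; no intermediate SP_CONTROLS list.
--
-- def _apply_ctrl(lines, ln, tag, size):
-- 	if tag in 'nst':
-- 		n = int(size) if size else 1
-- 		if tag == 't':
-- 			lines[ln] += '\t' * n
-- 		elif tag == 's':
-- 			lines[ln] += ' ' * n
-- 		else:
-- 			return ln + n
-- 	return ln
--
--
-- def APPLY_SPACING(raw_text, SP_CTRL):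
-- 	if SP_CTRL.endswith('\n'):
-- 		SP_CTRL = SP_CTRL[:-1]
--
-- 	lines = raw_text.replace('\r', '').split('\n')
--
-- 	if SP_CTRL:
-- 		ln = 0
-- 		tag, size = SP_CTRL[0], ''
-- 		for c in SP_CTRL[1:]:
-- 			if c in 'nst':
-- 				ln = _apply_ctrl(lines, ln, tag, size)
-- 				tag, size = c, ''
-- 			else:
-- 				size += c
-- 		_apply_ctrl(lines, ln, tag, size)
--
-- 	return lines
-- ===== Notes on version B (the rewrite author's own statement) =====
-- stated objective: faster
-- what changed: B fuses A's two phases (scan SP_CTRL with sp_idx/end bookkeeping into an SP_CONTROLS token list, then loop over that list) into a single left-to-right pass that applies each control as soon as the next tag character is seen; A's hand-indexed character-by-character accumulation of t_size defeats CPython's in-place str-concat optimization and degrades quadratically on long size runs, B's plain for-loop scan stays linear.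
import Mathlib
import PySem

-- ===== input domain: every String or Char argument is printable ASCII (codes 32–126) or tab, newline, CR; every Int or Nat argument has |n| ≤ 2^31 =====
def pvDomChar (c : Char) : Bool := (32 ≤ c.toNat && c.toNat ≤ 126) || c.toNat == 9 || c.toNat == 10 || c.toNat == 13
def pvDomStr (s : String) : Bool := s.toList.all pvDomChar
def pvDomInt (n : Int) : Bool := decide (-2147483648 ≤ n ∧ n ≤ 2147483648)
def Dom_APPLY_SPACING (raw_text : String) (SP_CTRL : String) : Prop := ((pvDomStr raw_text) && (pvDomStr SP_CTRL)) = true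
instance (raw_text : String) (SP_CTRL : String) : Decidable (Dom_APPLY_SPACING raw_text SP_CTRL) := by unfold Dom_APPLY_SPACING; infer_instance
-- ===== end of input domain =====

-- B is a single fused parse-and-apply pass over SP_CTRL; A first builds the SP_CONTROLS token
-- list and then loops over it. Equal return values on every input where the Python A returns.

-- ===== shared primitive-port helpers (exact ports of Python constructs used by BOTH sources) =====

-- exact port of Python's  c * n  on a character (negative n gives "")
def pvRep (c : Char) (n : Int) : List Char := List.replicate n.toNat c

-- exact port of Python's  lines[i] += s  (negative index from the end; none = IndexError)
def pvAugAt (lines : List (List Char)) (i : Int) (s : List Char) : Option (List (List Char)) :=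
  match PySem.List.pyGet? lines i with
  | none => none
  | some old => PySem.List.pySet? lines i (old ++ s)

-- ===== PORT A =====

-- inner while loop of A: collect t_size chars until a spacing char ('n','s','t') or end
def pvCollectA (acc : List Char) : List Char → (List Char × List Char)
  | [] => (acc, [])
  | c :: cs => if c = 'n' ∨ c = 's' ∨ c = 't' then (acc, c :: cs) else pvCollectA (acc ++ [c]) cs

theorem pvCollectA_snd_le (acc : List Char) (l : List Char) : (pvCollectA acc l).2.length ≤ l.length := by
  induction l generalizing acc with
  | nil => simp [pvCollectA]
  | cons c cs ih =>
    simp only [pvCollectA]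
    split
    · simp
    · exact le_trans (ih (acc ++ [c])) (Nat.le_succ _)

-- outer while loop of A: build SP_CONTROLS (each token = tag char :: defaulted size chars)
def pvTokA : List Char → List (List Char)
  | [] => []
  | c :: cs =>
    let r := pvCollectA [] cs
    (c :: (if r.1 = [] then ['1'] else r.1)) :: pvTokA r.2
termination_by l => l.length
decreasing_by
  exact Nat.lt_succ_of_le (pvCollectA_snd_le [] cs)

-- A's LINES: raw_text.replace('\r','').split('\n') then the (no-op) per-line replace('\n','')
def pvLinesA (raw : List Char) : List (List Char) :=
  (PySem.Chars.splitOn (PySem.Chars.replace raw ['\r'] []) ['\n']).map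
    (fun l => PySem.Chars.replace l ['\n'] [])

-- body of A's 'for CTRL in SP_CONTROLS' loop for one CTRL (branches in A's order; none = raise)
def pvStepA (lines : List (List Char)) (ln : Int) : List Char → Option (List (List Char) × Int)
  | [] => none
  | t :: sz =>
    if t = 't' then
      match PySem.Int.ofChars? sz with
      | none => none
      | some n => (pvAugAt lines ln (pvRep '\t' n)).map (fun l => (l, ln))
    else if t = 's' then
      match PySem.Int.ofChars? sz with
      | none => none
      | some n => (pvAugAt lines ln (pvRep ' ' n)).map (fun l => (l, ln))
    else if t = 'n' then
      match PySem.Int.ofChars? sz with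
      | none => none
      | some n => some (lines, ln + n)
    else some (lines, ln)

def pvRunA (ts : List (List Char)) (lines : List (List Char)) (ln : Int) : Option (List (List Char)) :=
  match ts with
  | [] => some lines
  | t :: rest =>
    match pvStepA lines ln t with
    | none => none
    | some (l, n) => pvRunA rest l n

def APPLY_SPACING (raw_text : String) (SP_CTRL : String) : List String :=
  ((pvRunA
      (pvTokA
        (if SP_CTRL.toList ≠ [] ∧ PySem.List.pyGet? SP_CTRL.toList (-1) = some '\n'
          then PySem.List.slice SP_CTRL.toList none (some (-1)) else SP_CTRL.toList))
      (pvLinesA raw_text.toList) 0).getD []).map String.ofList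

-- ===== PORT B =====

-- _apply_ctrl of Source B (none = raise inside it)
def pvApplyCtrlB (lines : List (List Char)) (ln : Int) (tag : Char) (size : List Char) :
    Option (List (List Char) × Int) :=
  if tag = 'n' ∨ tag = 's' ∨ tag = 't' then
    match (if size = [] then some 1 else PySem.Int.ofChars? size) with
    | none => none
    | some n =>
      if tag = 't' then (pvAugAt lines ln (pvRep '\t' n)).map (fun l => (l, ln))
      else if tag = 's' then (pvAugAt lines ln (pvRep ' ' n)).map (fun l => (l, ln))
      else some (lines, ln + n)
  else some (lines, ln)

-- Source B's 'for c in SP_CTRL[1:]' loop, then the final flush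
def pvGoB : List Char → Char → List Char → List (List Char) → Int → Option (List (List Char))
  | [], tag, size, lines, ln => (pvApplyCtrlB lines ln tag size).map (·.1)
  | c :: cs, tag, size, lines, ln =>
    if c = 'n' ∨ c = 's' ∨ c = 't' then
      match pvApplyCtrlB lines ln tag size with
      | none => none
      | some (l, n) => pvGoB cs c [] l n
    else pvGoB cs tag (size ++ [c]) lines ln

def pvLinesB (raw : List Char) : List (List Char) :=
  PySem.Chars.splitOn (PySem.Chars.replace raw ['\r'] []) ['\n']

def APPLY_SPACING_alt (raw_text : String) (SP_CTRL : String) : List String :=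
  match (if PySem.Chars.endswith SP_CTRL.toList ['\n']
      then PySem.List.slice SP_CTRL.toList none (some (-1)) else SP_CTRL.toList) with
  | [] => (pvLinesB raw_text.toList).map String.ofList
  | c :: cs => ((pvGoB cs c [] (pvLinesB raw_text.toList) 0).getD []).map String.ofList

-- ===== PRECONDITION & SPEC =====

-- Pre-only view of the control string: token start positions (0 and every later
-- spacing char), read off by index arithmetic rather than by any scan of the ports
def pvTokStarts (cl : List Char) : List Nat :=
  0 :: (List.range cl.length).filter
    (fun i => 0 < i ∧ cl.getD i ' ' ∈ (['n', 's', 't'] : List Char))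

def pvPreToks (cl : List Char) : List (Char × List Char) :=
  if cl = [] then []
  else
    ((pvTokStarts cl).zip ((pvTokStarts cl).tail ++ [cl.length])).map
      (fun p => (cl.getD p.1 ' ', (cl.drop (p.1 + 1)).take (p.2 - (p.1 + 1))))

def pvSizeVal (sz : List Char) : Option Int :=
  if sz = [] then some 1 else PySem.Int.ofChars? sz

-- line number reached just before token i (sum of the 'n' advances among earlier tokens)
def pvLineAt (ts : List (Char × List Char)) (i : Nat) : Int :=
  (((ts.take i).filter (fun p => p.1 = 'n')).map (fun p => (pvSizeVal p.2).getD 0)).sum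

-- Pre_ excludes exactly the inputs on which the Python A raises: a control size that int()
-- rejects (ValueError), or a tab/space control applied while the line number is outside the
-- list of lines (IndexError, counting Python's negative-index wraparound as in range).
def Pre_APPLY_SPACING (raw_text : String) (SP_CTRL : String) : Prop :=
  let cl := SP_CTRL.toList
  let ts := pvPreToks (if cl.getLast? = some '\n' then cl.dropLast else cl)
  let nl : Int := (pvLinesB raw_text.toList).length
  ∀ i ∈ List.range ts.length,
    (ts.getD i ('x', [])).1 ∈ (['n', 's', 't'] : List Char) →
      ((pvSizeVal (ts.getD i ('x', [])).2).isSome = true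
        ∧ ((ts.getD i ('x', [])).1 ≠ 'n' → -nl ≤ pvLineAt ts i ∧ pvLineAt ts i < nl))
instance (raw_text : String) (SP_CTRL : String) : Decidable (Pre_APPLY_SPACING raw_text SP_CTRL) := by
  unfold Pre_APPLY_SPACING; infer_instance

def pvWitness_APPLY_SPACING : String × String := ("ab\ncd", "t2ns1")

def Spec_APPLY_SPACING (raw_text : String) (SP_CTRL : String) (out : List String) : Prop := out = APPLY_SPACING_alt raw_text SP_CTRL
instance (raw_text : String) (SP_CTRL : String) (out : List String) : Decidable (Spec_APPLY_SPACING raw_text SP_CTRL out) := by unfold Spec_APPLY_SPACING; infer_instance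

-- ===== CLAIM (what is proved, stated in full; the proofs are below) =====
def Claim_equal_APPLY_SPACING : Prop := ∀ (raw_text : String) (SP_CTRL : String), Dom_APPLY_SPACING raw_text SP_CTRL → Pre_APPLY_SPACING raw_text SP_CTRL → Spec_APPLY_SPACING raw_text SP_CTRL (APPLY_SPACING raw_text SP_CTRL)

-- ===== LEMMAS AND PROOFS =====

-- one control step: A's branch cascade on the defaulted token equals Source B's _apply_ctrl
theorem pvStepA_eq_applyCtrlB (lines : List (List Char)) (ln : Int) (tag : Char) (sz : List Char) :
    pvStepA lines ln (tag :: (if sz = [] then ['1'] else sz)) = pvApplyCtrlB lines ln tag sz := by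
  by_cases hsz : sz = [] <;> by_cases ht : tag = 't' <;> by_cases hs : tag = 's' <;>
    by_cases hn : tag = 'n' <;>
      simp_all [pvStepA, pvApplyCtrlB, show PySem.Int.ofChars? ['1'] = some 1 from by decide]

-- accumulator form of A's inner collection loop
theorem pvCollectA_acc (acc : List Char) (l : List Char) :
    pvCollectA acc l = (acc ++ (pvCollectA [] l).1, (pvCollectA [] l).2) := by
  induction l generalizing acc with
  | nil => simp [pvCollectA]
  | cons c cs ih =>
    by_cases hc : c = 'n' ∨ c = 's' ∨ c = 't'
    · simp [pvCollectA, hc]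
    · rw [show pvCollectA acc (c :: cs) = pvCollectA (acc ++ [c]) cs from by simp [pvCollectA, hc],
        show pvCollectA [] (c :: cs) = pvCollectA ([] ++ [c]) cs from by simp [pvCollectA, hc],
        ih (acc ++ [c]), ih ([] ++ [c])]
      simp

-- main fused-loop invariant: B's scan with pending (tag, size) equals A's
-- collect-token-then-run continuation
theorem pvGoB_eq_runA (cs : List Char) (tag : Char) (size : List Char)
    (lines : List (List Char)) (ln : Int) :
    pvGoB cs tag size lines ln =
      (match pvStepA lines ln
          (tag :: (if size ++ (pvCollectA [] cs).1 = [] then ['1'] else size ++ (pvCollectA [] cs).1)) with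
        | none => none
        | some (l, n) => pvRunA (pvTokA (pvCollectA [] cs).2) l n) := by
  induction cs generalizing tag size lines ln with
  | nil =>
    rw [show pvCollectA [] [] = ([], []) from rfl]
    simp only [List.append_nil, pvTokA, pvGoB, pvStepA_eq_applyCtrlB]
    rcases h : pvApplyCtrlB lines ln tag size with _ | ⟨l, n⟩ <;> simp [pvRunA]
  | cons c cs ih =>
    by_cases hc : c = 'n' ∨ c = 's' ∨ c = 't'
    · rw [show pvCollectA [] (c :: cs) = ([], c :: cs) from by simp [pvCollectA, hc]]
      simp only [List.append_nil]
      rw [show pvTokA (c :: cs) =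
            (c :: (if (pvCollectA [] cs).1 = [] then ['1'] else (pvCollectA [] cs).1)) ::
              pvTokA (pvCollectA [] cs).2 from by rw [pvTokA]]
      rw [show pvGoB (c :: cs) tag size lines ln =
            (match pvApplyCtrlB lines ln tag size with
              | none => none
              | some (l, n) => pvGoB cs c [] l n) from by simp [pvGoB, hc]]
      rw [pvStepA_eq_applyCtrlB]
      rcases h : pvApplyCtrlB lines ln tag size with _ | ⟨l, n⟩
      · rfl
      · simp only [pvRunA]
        rw [ih c [] l n]
        simp only [List.nil_append]
    · rw [show pvCollectA [] (c :: cs) = pvCollectA ([] ++ [c]) cs from by simp [pvCollectA, hc],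
        pvCollectA_acc]
      rw [show pvGoB (c :: cs) tag size lines ln = pvGoB cs tag (size ++ [c]) lines ln from by
        simp [pvGoB, hc]]
      rw [ih tag (size ++ [c]) lines ln]
      simp

-- a fuel run of replace.go over chars never matching the (single-char) pattern is the identity
theorem pvReplaceGo_id (x : Char) (fuel : Nat) (l acc : List Char) (hf : l.length ≤ fuel)
    (hx : x ∉ l) :
    PySem.Chars.replace.go [x] [] fuel l acc = acc.reverse ++ l := by
  induction fuel generalizing l acc with
  | zero =>
    interval_cases hl : l.length
    all_goals cases l <;> simp_all [PySem.Chars.replace.go]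
  | succ f ih =>
    cases l with
    | nil => simp [PySem.Chars.replace.go]
    | cons c t =>
      have hxc : ([x].isPrefixOf (c :: t)) = false := by
        simp only [List.isPrefixOf, Bool.and_eq_false_iff]
        left
        simp only [beq_eq_false_iff_ne, ne_eq]
        intro h; exact hx (h ▸ List.mem_cons_self)
      rw [PySem.Chars.replace.go]
      simp only [hxc, Bool.false_eq_true, if_false]
      rw [ih t (c :: acc) (by simpa using Nat.lt_succ_iff.mp (by simpa using hf))
        (fun h => hx (List.mem_cons_of_mem _ h))]
      simp

theorem pvReplace_id (x : Char) (l : List Char) (hx : x ∉ l) :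
    PySem.Chars.replace l [x] [] = l := by
  rw [PySem.Chars.replace]
  simp only [List.isEmpty_cons, if_false, Bool.false_eq_true]
  simpa using pvReplaceGo_id x l.length l [] le_rfl hx

-- every piece produced by splitOn.go on a single-char separator avoids that separator
theorem pvSplitOnGo_no_sep (x : Char) (fuel : Nat) (l cur : List Char)
    (acc : List (List Char)) (hf : l.length < fuel) (hcur : x ∉ cur)
    (hacc : ∀ p ∈ acc, x ∉ p) :
    ∀ p ∈ PySem.Chars.splitOn.go [x] fuel l cur acc, x ∉ p := by
  induction fuel generalizing l cur acc with
  | zero => omega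
  | succ f ih =>
    cases l with
    | nil =>
      have hgo : PySem.Chars.splitOn.go [x] (f + 1) [] cur acc = (cur.reverse :: acc).reverse := by
        simp [PySem.Chars.splitOn.go]
      rw [hgo]
      intro p hp
      simp only [List.mem_reverse, List.mem_cons] at hp
      rcases hp with h | h
      · subst h; simpa using hcur
      · exact hacc p h
    | cons c t =>
      by_cases hxc : c = x
      · have hpre : ([x].isPrefixOf (c :: t)) = true := by simp [List.isPrefixOf, hxc]
        rw [PySem.Chars.splitOn.go]
        simp only [hpre, if_true]
        refine ih t [] (cur.reverse :: acc) (by simpa using hf) (by simp) ?_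
        intro p hp
        rcases List.mem_cons.mp hp with h | h
        · subst h; simpa using hcur
        · exact hacc p h
      · have hpre : ([x].isPrefixOf (c :: t)) = false := by
          simp [List.isPrefixOf]
          exact fun h => (hxc h.symm).elim
        rw [PySem.Chars.splitOn.go]
        simp only [hpre, Bool.false_eq_true, if_false]
        refine ih t (c :: cur) acc (by simpa using Nat.lt_succ_iff.mp (by simpa using hf)) ?_ hacc
        intro h
        rcases List.mem_cons.mp h with h | h
        · exact hxc h.symm
        · exact hcur h

theorem pvSplitOn_no_sep (x : Char) (s : List Char) :
    ∀ p ∈ PySem.Chars.splitOn s [x], x ∉ p := by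
  rw [PySem.Chars.splitOn]
  exact pvSplitOnGo_no_sep x (s.length + 1) s [] [] (Nat.lt_succ_self _) (by simp) (by simp)

-- the per-line replace('\n','') in A is the identity on pieces of split('\n')
theorem pvLinesA_eq_pvLinesB (raw : List Char) : pvLinesA raw = pvLinesB raw := by
  unfold pvLinesA pvLinesB
  rw [List.map_congr_left (fun l hl => pvReplace_id '\n' l (pvSplitOn_no_sep '\n' _ l hl))]
  simp

-- A's manual trailing-newline test equals Source B's endswith
theorem pvStrip_eq (cl : List Char) :
    (if cl ≠ [] ∧ PySem.List.pyGet? cl (-1) = some '\n' then PySem.List.slice cl none (some (-1)) else cl)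
      = (if PySem.Chars.endswith cl ['\n'] then PySem.List.slice cl none (some (-1)) else cl) := by
  by_cases h : PySem.Chars.endswith cl ['\n']
  · obtain ⟨t, ht⟩ := (PySem.Chars.endswith_iff cl ['\n']).mp h
    subst ht
    simp [h, PySem.List.pyGet?_neg_one_append_singleton t '\n']
  · have hA : ¬(cl ≠ [] ∧ PySem.List.pyGet? cl (-1) = some '\n') := by
      rintro ⟨hne, hget⟩
      rcases List.eq_nil_or_concat cl with rfl | ⟨xs, x, rfl⟩
      · exact hne rfl
      · rw [List.concat_eq_append] at hget h
        rw [PySem.List.pyGet?_neg_one_append_singleton] at hget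
        have hx : x = '\n' := by injection hget
        exact h ((PySem.Chars.endswith_iff _ _).mpr ⟨xs, by rw [hx]⟩)
    simp [h, hA]

-- ===== VERDICT (by name: the statement is the Claim_ definition above) =====
theorem APPLY_SPACING_spec : Claim_equal_APPLY_SPACING := by
  intro raw sp _ _
  show APPLY_SPACING raw sp = APPLY_SPACING_alt raw sp
  unfold APPLY_SPACING APPLY_SPACING_alt
  rw [pvStrip_eq, pvLinesA_eq_pvLinesB]
  cases h : (if PySem.Chars.endswith sp.toList ['\n'] = true
      then PySem.List.slice sp.toList none (some (-1)) else sp.toList) with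
  | nil => simp [pvTokA, pvRunA]
  | cons c cs =>
    simp only []
    rw [show pvTokA (c :: cs) =
          (c :: (if (pvCollectA [] cs).1 = [] then ['1'] else (pvCollectA [] cs).1)) ::
            pvTokA (pvCollectA [] cs).2 from by rw [pvTokA]]
    rw [show (pvRunA
          ((c :: (if (pvCollectA [] cs).1 = [] then ['1'] else (pvCollectA [] cs).1)) ::
            pvTokA (pvCollectA [] cs).2) (pvLinesB raw.toList) 0) =
        (match pvStepA (pvLinesB raw.toList) 0
            (c :: (if (pvCollectA [] cs).1 = [] then ['1'] else (pvCollectA [] cs).1)) with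
          | none => none
          | some (l, n) => pvRunA (pvTokA (pvCollectA [] cs).2) l n) from by rw [pvRunA]]
    rw [pvGoB_eq_runA cs c [] (pvLinesB raw.toList) 0]
    simp
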